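-- pv_equiv track=rewrite | github.com/Vincent-Renard/iapy_td | fleches.py | action_i
-- ===== SOURCE A (Python) =====
-- def permute(fleche): return (fleche + 1) % 2
--
-- def action_i(pos, state):
--     s = []
--     n = 0
--     for i in state:
--         if n == pos or (n > 0 and n - 1 == pos):
--
--             s.append(permute(i))
--         else:
--             s.append(i)
--         n += 1
--     return tuple(s), 1
-- ===== SOURCE B (Python) =====
-- def permute(fleche): return (fleche + 1) % 2
--
-- def action_i(pos, state):
--     if pos < 0:
--         return tuple(state), 1
--     return (tuple(state[:pos])
--             + tuple(permute(x) for x in state[pos:pos + 2])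
--             + tuple(state[pos + 2:]), 1)
-- ===== Notes on version B (the rewrite author's own statement) =====
-- stated objective: simpler
-- what changed: Replaces the counter-driven element-by-element loop with three slices: copy the prefix, map permute over the two-element window state[pos:pos+2], copy the suffix (pos < 0 is an explicit no-op, matching A's loop which never flips for negative pos).
import Mathlib
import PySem

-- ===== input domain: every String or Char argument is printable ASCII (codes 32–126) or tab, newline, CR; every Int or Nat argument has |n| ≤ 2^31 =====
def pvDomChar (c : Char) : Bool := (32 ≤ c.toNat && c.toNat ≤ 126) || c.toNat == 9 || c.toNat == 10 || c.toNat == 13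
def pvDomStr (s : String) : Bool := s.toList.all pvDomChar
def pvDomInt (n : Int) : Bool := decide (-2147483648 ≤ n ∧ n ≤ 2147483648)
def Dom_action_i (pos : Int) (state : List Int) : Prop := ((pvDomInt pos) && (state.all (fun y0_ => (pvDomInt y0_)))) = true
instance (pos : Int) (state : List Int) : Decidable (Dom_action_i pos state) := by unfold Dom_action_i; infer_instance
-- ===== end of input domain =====

-- B replaces A's counter loop by slice-and-map (pos < 0 is an explicit no-op); objective: simpler.

-- ===== PORT A =====
def permute (fleche : Int) : Int := PySem.Int.mod (fleche + 1) 2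

def action_i (pos : Int) (state : List Int) : List Int × Int :=
  let r := state.foldl
    (fun (acc : List Int × Int) i =>
      (if acc.2 = pos ∨ (0 < acc.2 ∧ acc.2 - 1 = pos)
        then acc.1 ++ [permute i] else acc.1 ++ [i], acc.2 + 1))
    ([], 0)
  (r.1, 1)

-- ===== PORT B =====
def action_i_alt (pos : Int) (state : List Int) : List Int × Int :=
  if pos < 0 then (state, 1)
  else (PySem.List.slice state none (some pos)
          ++ (PySem.List.slice state (some pos) (some (pos + 2))).map permute
          ++ PySem.List.slice state (some (pos + 2)) none, 1)

-- ===== PRECONDITION & SPEC =====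
def Spec_action_i (pos : Int) (state : List Int) (out : List Int × Int) : Prop := out = action_i_alt pos state
instance (pos : Int) (state : List Int) (out : List Int × Int) : Decidable (Spec_action_i pos state out) := by unfold Spec_action_i; infer_instance

-- ===== CLAIM (what is proved, stated in full; the proofs are below) =====
def Claim_equal_action_i : Prop := ∀ (pos : Int) (state : List Int), Dom_action_i pos state → Spec_action_i pos state (action_i pos state)

-- ===== LEMMAS AND PROOFS =====

-- A's loop body written as a structural recursion carrying the counter n
def pvF (pos : Int) (n : Int) : List Int → List Int
  | [] => []
  | x :: xs => (if n = pos ∨ (0 < n ∧ n - 1 = pos) then permute x else x) :: pvF pos (n + 1) xs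

theorem pvF_foldl (pos : Int) (xs : List Int) : ∀ (s0 : List Int) (n0 : Int),
    (xs.foldl
      (fun (acc : List Int × Int) i =>
        (if acc.2 = pos ∨ (0 < acc.2 ∧ acc.2 - 1 = pos)
          then acc.1 ++ [permute i] else acc.1 ++ [i], acc.2 + 1))
      (s0, n0)).1 = s0 ++ pvF pos n0 xs := by
  induction xs with
  | nil => intro s0 n0; simp [pvF]
  | cons x xs ih =>
    intro s0 n0
    simp only [List.foldl, pvF]
    split <;> simp [ih]

theorem pvF_neg (pos : Int) (hpos : pos < 0) : ∀ (xs : List Int) (n : Int), 0 ≤ n → pvF pos n xs = xs := by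
  intro xs
  induction xs with
  | nil => intro n _; rfl
  | cons x xs ih =>
    intro n hn
    simp only [pvF]
    rw [if_neg (by omega), ih (n + 1) (by omega)]

theorem pvF_past (pos : Int) : ∀ (xs : List Int) (n : Int), pos + 1 < n → pvF pos n xs = xs := by
  intro xs
  induction xs with
  | nil => intro n _; rfl
  | cons x xs ih =>
    intro n hn
    simp only [pvF]
    rw [if_neg (by omega), ih (n + 1) (by omega)]

theorem pvF_shift (pos : Int) (hpos : 1 ≤ pos) : ∀ (xs : List Int) (n : Int), 1 ≤ n →
    pvF pos n xs = pvF (pos - 1) (n - 1) xs := by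
  intro xs
  induction xs with
  | nil => intro n _; rfl
  | cons x xs ih =>
    intro n hn
    simp only [pvF]
    congr 1
    · by_cases h : n = pos ∨ 0 < n ∧ n - 1 = pos
      · rw [if_pos h, if_pos (by omega)]
      · rw [if_neg h, if_neg (by omega)]
    · rw [ih (n + 1) (by omega)]
      congr 1
      omega

theorem pvF_main (xs : List Int) : ∀ (pos : Int), 0 ≤ pos →
    pvF pos 0 xs = xs.take pos.toNat ++ ((xs.drop pos.toNat).take 2).map permute ++ xs.drop (pos.toNat + 2) := by
  induction xs with
  | nil => intro pos _; simp [pvF]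
  | cons x xs ih =>
    intro pos hpos
    rcases eq_or_lt_of_le hpos with h0 | h1
    · -- pos = 0
      subst h0
      cases xs with
      | nil => simp [pvF]
      | cons y ys =>
        norm_num [pvF, pvF_past 0 ys 2 (by omega)]
    · -- pos ≥ 1
      simp only [pvF]
      rw [if_neg (by omega), show (0:Int) + 1 = 1 from by norm_num,
        pvF_shift pos (by omega) xs 1 (by omega), show (1:Int) - 1 = 0 from by norm_num,
        ih (pos - 1) (by omega)]
      have h2 : pos.toNat = (pos - 1).toNat + 1 := by omega
      have h3 : (pos - 1).toNat + 1 + 2 = ((pos - 1).toNat + 2) + 1 := by omega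
      rw [h2, h3]
      simp

-- ===== VERDICT (by name: the statement is the Claim_ definition above) =====
theorem action_i_spec : Claim_equal_action_i := by
  intro pos state _
  unfold Spec_action_i action_i action_i_alt
  simp only [pvF_foldl, List.nil_append]
  by_cases h : pos < 0
  · rw [if_pos h, pvF_neg pos h state 0 (by omega)]
  · rw [if_neg h]
    have hpos : 0 ≤ pos := by omega
    rw [PySem.List.slice_to state hpos, PySem.List.slice_from state (by omega),
      PySem.List.slice_toNat state hpos (by omega), pvF_main state pos hpos]
    have e1 : (pos + 2).toNat - pos.toNat = 2 := by omega
    have e2 : (pos + 2).toNat = pos.toNat + 2 := by omega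
    rw [e1, e2]
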